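-- pv_equiv track=rewrite | github.com/LouisEsteve/LegalEval2023 | L_NER_CRF_train.py | IOBES_transformer
-- ===== SOURCE A (Python) =====
-- def IOBES_transformer(
-- 		x		:	list,
-- 		null_class	:	str	=	'NONE'
-- 	) -> list:
-- 	'''
-- 	This function transforms x into an IOBES-compliant format.
-- 	Input and output are both a list of lists of strings.
-- 	It expects null_class as the equivalent of 'O', which by default is set to 'NONE'.
--
-- 	def IOBES_transformer(
-- 			x		:	list,
-- 			null_class	:	str	=	'NONE'
-- 		) -> list:
-- 		[...]
-- 	'''
-- 	########
-- 	global_output	=	[]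
-- 	for i in x:
-- 		local_output	=	[]
-- 		previous_class	=	None
-- 		for j in i:
-- 			prefix	=	''
-- 			if j != previous_class:
-- 				if len(local_output) > 0:
-- 					if local_output[-1][0] == 'B':
-- 						local_output[-1]	=	f'S{local_output[-1][1:]}'
-- 					elif local_output[-1][0] == 'I':
-- 						local_output[-1]	=	f'E{local_output[-1][1:]}'
--
-- 				if j != null_class:
-- 					prefix	=	'B-'
-- 			else:
-- 				prefix	=	'I-'
-- 			if j == null_class:
-- 				local_output.append('O')
-- 			else:
-- 				local_output.append(f'{prefix}{j}')
-- 			previous_class	=	j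
-- 		#####
-- 		# END OF DOCUMENT FIX
-- 		if len(local_output) > 0:
-- 			if local_output[-1][0] == 'B':
-- 				local_output[-1]	=	f'S{local_output[-1][1:]}'
-- 			elif local_output[-1][0] == 'I':
-- 				local_output[-1]	=	f'E{local_output[-1][1:]}'
-- 		#####
-- 		global_output.append(local_output)
-- 	return global_output
-- ===== SOURCE B (Python) =====
-- def IOBES_transformer(
-- 		x		:	list,
-- 		null_class	:	str	=	'NONE'
-- 	) -> list:
-- 	'''
-- 	Run-segmentation re-implementation: split each sublist into maximal runs
-- 	of consecutive identical labels, then emit IOBES tags per run.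
-- 	'''
-- 	return [_iobes_tags(seq, null_class) for seq in x]
--
-- def _iobes_tags(seq, null_class):
-- 	tags	=	[]
-- 	i	=	0
-- 	n	=	len(seq)
-- 	while i < n:
-- 		lab	=	seq[i]
-- 		j	=	i + 1
-- 		while j < n and seq[j] == lab:
-- 			j	+=	1
-- 		k	=	j - i
-- 		if lab == null_class:
-- 			tags	+=	['O'] * k
-- 		elif k == 1:
-- 			tags.append(f'S-{lab}')
-- 		else:
-- 			tags	+=	[f'B-{lab}'] + [f'I-{lab}'] * (k - 2) + [f'E-{lab}']
-- 		i	=	j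
-- 	return tags
-- ===== Notes on version B (the rewrite author's own statement) =====
-- stated objective: alternative
-- what changed: Replaces A's incremental append-and-retro-edit loop (which rewrites the previous tag's first letter at each class change and after the loop) with run segmentation: each sublist is split into maximal runs of consecutive identical labels and IOBES tags are emitted positionally per run (O-run, singleton S-, or B-/I-*/E-).
import Mathlib
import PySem

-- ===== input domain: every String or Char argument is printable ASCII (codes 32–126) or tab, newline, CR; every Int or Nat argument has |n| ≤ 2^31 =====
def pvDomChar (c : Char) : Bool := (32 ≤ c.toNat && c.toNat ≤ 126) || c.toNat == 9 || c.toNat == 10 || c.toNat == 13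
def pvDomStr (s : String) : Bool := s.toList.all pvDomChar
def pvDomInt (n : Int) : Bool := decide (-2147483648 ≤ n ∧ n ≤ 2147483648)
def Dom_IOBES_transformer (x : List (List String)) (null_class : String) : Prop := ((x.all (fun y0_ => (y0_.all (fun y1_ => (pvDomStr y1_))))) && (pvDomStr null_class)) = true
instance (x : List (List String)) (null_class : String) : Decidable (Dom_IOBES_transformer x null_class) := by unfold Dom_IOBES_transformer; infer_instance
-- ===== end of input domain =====

-- B replaces A's incremental append-and-retro-edit loop by run segmentation with positional
-- tag emission (alternative decomposition, same asymptotic cost). Return value only.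

-- ===== PORT A =====
-- the END OF DOCUMENT FIX block of A (also run at each class change):
--   if len(local_output) > 0: if local_output[-1][0]=='B': … 'S'+[1:]  elif 'I': … 'E'+[1:]
-- local_output[-1][0] is PySem.Str.pyGet?; its 'none' branch is unreachable (elements are never "")
def pyEndFix (lo : List String) : List String :=
  if lo.length > 0 then
    match PySem.List.pyGet? lo (-1) with
    | none => lo
    | some last =>
      if PySem.Str.pyGet? last 0 = some 'B' then
        lo.dropLast ++ ["S" ++ PySem.Str.slice last (some 1) none]
      else if PySem.Str.pyGet? last 0 = some 'I' then
        lo.dropLast ++ ["E" ++ PySem.Str.slice last (some 1) none]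
      else lo
  else lo

-- one iteration of A's inner 'for j in i' loop; state = (local_output, previous_class)
def aStep (null_class : String) (st : List String × Option String) (j : String) : List String × Option String :=
  let local_output := st.1
  let previous_class := st.2
  let pfx : String :=
    if some j ≠ previous_class then (if j ≠ null_class then "B-" else "") else "I-"
  let local_output :=
    if some j ≠ previous_class then pyEndFix local_output else local_output
  let local_output :=
    if j = null_class then local_output ++ ["O"] else local_output ++ [pfx ++ j]
  (local_output, some j)

def IOBES_transformer (x : List (List String)) (null_class : String) : List (List String) :=
  x.foldl (fun global_output i =>
    global_output ++ [pyEndFix (i.foldl (aStep null_class) ([], none)).1]) []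

-- ===== PORT B =====
-- _iobes_tags: peel the maximal run of the leading label, emit its tags, recurse on the rest
def iobesTags (seq : List String) (null_class : String) : List String :=
  match seq with
  | [] => []
  | lab :: t =>
    let run := t.takeWhile (fun s => s == lab)
    let rest := t.dropWhile (fun s => s == lab)
    let k := run.length + 1
    (if lab = null_class then List.replicate k "O"
     else if k = 1 then ["S-" ++ lab]
     else (("B-" ++ lab) :: List.replicate (k - 2) ("I-" ++ lab)) ++ ["E-" ++ lab])
    ++ iobesTags rest null_class
termination_by seq.length
decreasing_by
  simp only [List.length_cons]
  exact Nat.lt_succ_of_le (List.length_dropWhile_le _ t)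

def IOBES_transformer_alt (x : List (List String)) (null_class : String) : List (List String) :=
  x.map (fun seq => iobesTags seq null_class)

-- ===== PRECONDITION & SPEC =====
def Spec_IOBES_transformer (x : List (List String)) (null_class : String) (out : List (List String)) : Prop := out = IOBES_transformer_alt x null_class
instance (x : List (List String)) (null_class : String) (out : List (List String)) : Decidable (Spec_IOBES_transformer x null_class out) := by unfold Spec_IOBES_transformer; infer_instance

-- ===== CLAIM (what is proved, stated in full; the proofs are below) =====
def Claim_equal_IOBES_transformer : Prop := ∀ (x : List (List String)) (null_class : String), Dom_IOBES_transformer x null_class → Spec_IOBES_transformer x null_class (IOBES_transformer x null_class)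

-- ===== LEMMAS AND PROOFS =====

-- the per-element edit pyEndFix performs on the last element
def fixTag (s : String) : String :=
  if PySem.Str.pyGet? s 0 = some 'B' then "S" ++ PySem.Str.slice s (some 1) none
  else if PySem.Str.pyGet? s 0 = some 'I' then "E" ++ PySem.Str.slice s (some 1) none
  else s

lemma pyEndFix_snoc (l : List String) (s : String) :
    pyEndFix (l ++ [s]) = l ++ [fixTag s] := by
  unfold pyEndFix fixTag
  have hget : PySem.List.pyGet? (l ++ [s]) (-1) = some s := by
    simp [PySem.List.pyGet?, PySem.List.pyIdx?]
  rw [hget]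
  simp only [List.length_append, List.length_cons, List.length_nil]
  rw [if_pos (by omega)]
  split_ifs <;> simp

lemma fixTag_B (lab : String) : fixTag ("B-" ++ lab) = "S-" ++ lab := by
  unfold fixTag
  have h0 : PySem.Str.pyGet? ("B-" ++ lab) 0 = some 'B' := by
    simp [String.toList_append]
  rw [h0]
  apply String.toList_inj.mp
  simp [PySem.Str.toList_slice, String.toList_append, PySem.List.slice_from_one]

lemma fixTag_I (lab : String) : fixTag ("I-" ++ lab) = "E-" ++ lab := by
  unfold fixTag
  have h0 : PySem.Str.pyGet? ("I-" ++ lab) 0 = some 'I' := by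
    simp [String.toList_append]
  rw [h0]
  rw [if_neg (by simp), if_pos rfl]
  apply String.toList_inj.mp
  simp [PySem.Str.toList_slice, String.toList_append, PySem.List.slice_from_one]

lemma fixTag_O : fixTag "O" = "O" := by decide

-- the tag A appends for an element continuing the current run / starting a new run
def contTag (null_class lab : String) : String :=
  if lab = null_class then "O" else "I-" ++ lab

def firstTag (null_class lab : String) : String :=
  if lab = null_class then "O" else "B-" ++ lab

-- continuing a run: k more copies of lab with previous_class = lab append k contTags, no fix
lemma aStep_run (null_class lab : String) : ∀ (k : Nat) (rest acc : List String),
    List.foldl (aStep null_class) (acc, some lab) (List.replicate k lab ++ rest)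
      = List.foldl (aStep null_class) (acc ++ List.replicate k (contTag null_class lab), some lab) rest := by
  intro k
  induction k with
  | zero => intro rest acc; simp
  | succ k ih =>
    intro rest acc
    rw [List.replicate_succ, List.cons_append, List.foldl_cons]
    have hstep : aStep null_class (acc, some lab) lab = (acc ++ [contTag null_class lab], some lab) := by
      simp only [aStep, contTag]
      split_ifs <;> simp_all
    rw [hstep, ih rest (acc ++ [contTag null_class lab])]
    rw [List.replicate_succ, List.append_assoc, List.singleton_append]

-- starting a run: previous_class ≠ lab fixes acc and appends the firstTag
lemma aStep_first (null_class lab : String) (prev : Option String) (h : prev ≠ some lab)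
    (acc : List String) :
    aStep null_class (acc, prev) lab = (pyEndFix acc ++ [firstTag null_class lab], some lab) := by
  unfold aStep firstTag
  have hne : some lab ≠ prev := Ne.symm h
  by_cases hnull : lab = null_class
  · subst hnull
    simp [hne]
  · simp [hne, hnull]

-- per-run tags of B, as a function of the label and the run length (length = n+1 ≥ 1)
lemma iobesTags_cons (null_class lab : String) (t : List String) :
    iobesTags (lab :: t) null_class =
      (if lab = null_class then List.replicate ((t.takeWhile (fun s => s == lab)).length + 1) "O"
       else if (t.takeWhile (fun s => s == lab)).length + 1 = 1 then ["S-" ++ lab]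
       else (("B-" ++ lab) :: List.replicate ((t.takeWhile (fun s => s == lab)).length + 1 - 2) ("I-" ++ lab)) ++ ["E-" ++ lab])
      ++ iobesTags (t.dropWhile (fun s => s == lab)) null_class := by
  rw [iobesTags]

-- closing the pending block: pyEndFix of acc ++ (firstTag :: replicate n contTag) is acc ++ B's run tags
lemma pyEndFix_block (null_class lab : String) (n : Nat) (acc : List String) :
    pyEndFix (acc ++ (firstTag null_class lab :: List.replicate n (contTag null_class lab)))
      = acc ++ (if lab = null_class then List.replicate (n + 1) "O"
                else if n + 1 = 1 then ["S-" ++ lab]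
                else (("B-" ++ lab) :: List.replicate (n + 1 - 2) ("I-" ++ lab)) ++ ["E-" ++ lab]) := by
  by_cases hnull : lab = null_class
  · -- all tags are "O"; the last element "O" is left unchanged by the fix
    subst hnull
    simp only [firstTag, contTag, if_true]
    cases n with
    | zero => simpa using pyEndFix_snoc acc "O"
    | succ m =>
      have hsplit : acc ++ (("O" : String) :: List.replicate (m + 1) "O")
            = (acc ++ (("O" : String) :: List.replicate m "O")) ++ ["O"] := by
        simp [List.replicate_succ' (n := m)]
      rw [hsplit, pyEndFix_snoc, fixTag_O]
      simp only [List.replicate_succ (n := m + 1), List.append_assoc,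
        List.cons_append, List.append_cancel_left_eq, List.cons.injEq, true_and]
      rw [List.replicate_succ']
  · cases n with
    | zero =>
      simp only [firstTag, contTag, List.replicate_zero]
      have := pyEndFix_snoc acc ("B-" ++ lab)
      simp only [if_neg hnull] at *
      rw [show (("B-" ++ lab) :: ([] : List String)) = [("B-" ++ lab)] from rfl, this, fixTag_B]
      simp
    | succ m =>
      simp only [firstTag, contTag, if_neg hnull]
      have hsplit : (("B-" ++ lab) :: List.replicate (m + 1) ("I-" ++ lab))
          = (("B-" ++ lab) :: List.replicate m ("I-" ++ lab)) ++ ["I-" ++ lab] := by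
        simp [List.replicate_succ' (n := m)]
      rw [hsplit, ← List.append_assoc, pyEndFix_snoc, fixTag_I]
      simp [List.append_assoc]

lemma head?_dropWhile_false {α : Type} (x : α) (p : α → Bool) (t : List α)
    (h : (t.dropWhile p).head? = some x) : p x = false := by
  induction t with
  | nil => simp at h
  | cons a t ih =>
    rw [List.dropWhile_cons] at h
    split at h
    · exact ih h
    · simp_all

lemma takeWhile_eq_replicate (lab : String) (t : List String) :
    t.takeWhile (fun s => s == lab) = List.replicate (t.takeWhile (fun s => s == lab)).length lab := by
  apply List.eq_replicate_of_mem
  intro y hy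
  have := List.mem_takeWhile_imp hy
  simpa using this

-- MAIN per-sequence lemma: A's inner loop + end-of-document fix computes B's run tags
lemma inner_eq (null_class : String) : ∀ (n : Nat) (s acc : List String) (prev : Option String),
    s.length ≤ n →
    (∀ h, s.head? = some h → prev ≠ some h) →
    pyEndFix ((s.foldl (aStep null_class) (acc, prev)).1)
      = pyEndFix acc ++ iobesTags s null_class := by
  intro n
  induction n with
  | zero =>
    intro s acc prev hlen _
    have hs : s = [] := List.eq_nil_of_length_eq_zero (Nat.le_zero.mp hlen)
    subst hs
    rw [iobesTags]
    simp
  | succ n ih =>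
    intro s acc prev hlen hprev
    cases s with
    | nil => rw [iobesTags]; simp
    | cons lab t =>
      have hprev' : prev ≠ some lab := hprev lab (by simp)
      have ht : (t.takeWhile (fun s => s == lab)) ++ (t.dropWhile (fun s => s == lab)) = t :=
        List.takeWhile_append_dropWhile
      have hrun := takeWhile_eq_replicate lab t
      have hfold : (List.foldl (aStep null_class) (acc, prev) (lab :: t)).1
          = (List.foldl (aStep null_class)
              ((pyEndFix acc ++ [firstTag null_class lab])
                ++ List.replicate (t.takeWhile (fun s => s == lab)).length (contTag null_class lab),
               some lab)
              (t.dropWhile (fun s => s == lab))).1 := by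
        conv_lhs => rw [List.foldl_cons, aStep_first null_class lab prev hprev' acc, ← ht, hrun]
        rw [aStep_run]
      have hlen' : (t.dropWhile (fun s => s == lab)).length ≤ n :=
        le_trans (List.length_dropWhile_le _ t) (by simpa using Nat.succ_le_succ_iff.mp hlen)
      have hprevrest : ∀ h, (t.dropWhile (fun s => s == lab)).head? = some h → (some lab : Option String) ≠ some h := by
        intro h hh
        have hfalse := head?_dropWhile_false h _ t hh
        simp only [beq_eq_false_iff_ne, ne_eq] at hfalse
        intro hcontra
        exact hfalse (Option.some.inj hcontra).symm
      rw [hfold, ih _ _ _ hlen' hprevrest, iobesTags_cons]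
      rw [List.append_assoc, List.singleton_append, pyEndFix_block]
      simp [List.append_assoc]

-- ===== VERDICT (by name: the statement is the Claim_ definition above) =====
theorem IOBES_transformer_spec : Claim_equal_IOBES_transformer := by
  intro x null_class _
  unfold Spec_IOBES_transformer IOBES_transformer IOBES_transformer_alt
  rw [PySem.List.foldl_append_singleton_eq_map]
  apply List.map_congr_left
  intro i _
  have h := inner_eq null_class i.length i [] none (le_refl _) (by intro h _; simp)
  have hnil : pyEndFix ([] : List String) = [] := by rfl
  rw [hnil] at h
  simpa using h
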